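-- pv_equiv track=rewrite | github.com/shlomopongartz/Facebook | slowsum.py | getTotalTime
-- ===== SOURCE A (Python) =====
-- def getTotalTime(arr):
--   # Write your code here
--   arr.sort(reverse=True)
--   length = len(arr)
--   sum = arr[0]
--   penalty = 0
--   for i in range(1, length):
-- 	  sum = sum + arr[i]
-- 	  penalty += sum
--
--   return penalty
-- ===== SOURCE B (Python) =====
-- def getTotalTime(arr):
--   # Rank-weighted sum: each sorted element appears in (n - rank) prefix sums
--   # (the top element in n-1). Same in-place descending sort as A.
--   arr.sort(reverse=True)
--   n = len(arr)
--   penalty = (n - 1) * arr[0]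
--   for k in range(1, n):
--     penalty += (n - k) * arr[k]
--   return penalty
-- ===== Notes on version B (the rewrite author's own statement) =====
-- stated objective: alternative
-- what changed: Replaces the running prefix-sum accumulator with a direct rank-weighted sum: each sorted element contributes its value times the number of prefix sums containing it ((n-1) for the head, n-k for rank k).
-- outside the precondition, e.g. on getTotalTime([]): A raises IndexError, B raises IndexError
import Mathlib
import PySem

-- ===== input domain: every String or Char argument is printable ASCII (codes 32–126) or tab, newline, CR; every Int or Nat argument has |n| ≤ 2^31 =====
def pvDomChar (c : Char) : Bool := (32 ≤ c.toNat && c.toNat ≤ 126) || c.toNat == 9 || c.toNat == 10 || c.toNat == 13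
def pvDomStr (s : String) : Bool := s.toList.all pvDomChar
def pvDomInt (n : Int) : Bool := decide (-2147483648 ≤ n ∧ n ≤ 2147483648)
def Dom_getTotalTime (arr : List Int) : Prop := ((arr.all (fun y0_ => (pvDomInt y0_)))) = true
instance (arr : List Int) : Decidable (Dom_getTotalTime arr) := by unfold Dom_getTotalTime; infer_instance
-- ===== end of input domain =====

-- B replaces A's running prefix-sum accumulator with a direct rank-weighted sum
-- (objective: alternative decomposition, same cost). Both sort the argument in
-- place in Python; the equivalence proved here is about the return value.

-- ===== PORT A =====
def getTotalTime (arr : List Int) : Int :=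
  let s := PySem.List.sorted arr (fun x => x) true
  let length : Int := PySem.List.len s
  let init : Int × Int := (PySem.List.pyGetD s 0 0, 0)
  let res := (PySem.List.pyRange 1 length 1).foldl
    (fun (st : Int × Int) i =>
      let sum := st.1 + PySem.List.pyGetD s i 0
      (sum, st.2 + sum)) init
  res.2

-- ===== PORT B =====
def getTotalTime_alt (arr : List Int) : Int :=
  let s := PySem.List.sorted arr (fun x => x) true
  let n : Int := PySem.List.len s
  let p0 : Int := (n - 1) * PySem.List.pyGetD s 0 0
  (PySem.List.pyRange 1 n 1).foldl
    (fun pen k => pen + (n - k) * PySem.List.pyGetD s k 0) p0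

-- ===== PRECONDITION & SPEC =====
-- A raises IndexError on the empty list (arr[0]); so does B.
def Pre_getTotalTime (arr : List Int) : Prop := arr ≠ []
instance (arr : List Int) : Decidable (Pre_getTotalTime arr) := by unfold Pre_getTotalTime; infer_instance
def pvWitness_getTotalTime : List Int := [3, 1, 2]

def Spec_getTotalTime (arr : List Int) (out : Int) : Prop := out = getTotalTime_alt arr
instance (arr : List Int) (out : Int) : Decidable (Spec_getTotalTime arr out) := by unfold Spec_getTotalTime; infer_instance

-- ===== CLAIM (what is proved, stated in full; the proofs are below) =====
def Claim_equal_getTotalTime : Prop := ∀ (arr : List Int), Dom_getTotalTime arr → Pre_getTotalTime arr → Spec_getTotalTime arr (getTotalTime arr)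

-- ===== LEMMAS AND PROOFS =====

-- weighted sum Σ (len t - j) * t[j], defined structurally
def pvWsum : List Int → Int
  | [] => 0
  | x :: t => ((t.length : Int) + 1) * x + pvWsum t

lemma pvWsum_append (t : List Int) (x : Int) :
    pvWsum (t ++ [x]) = pvWsum t + t.sum + x := by
  induction t with
  | nil => simp [pvWsum]
  | cons y t ih => simp [pvWsum, ih]; ring

lemma pvFoldA_fst (t : List Int) (S P : Int) :
    (t.foldl (fun (st : Int × Int) x => (st.1 + x, st.2 + (st.1 + x))) (S, P)).1
      = S + t.sum := by
  induction t generalizing S P with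
  | nil => simp
  | cons y t ih => simp [List.foldl_cons, ih]; ring

lemma pvFoldA_snd (a : Int) (t : List Int) :
    (t.foldl (fun (st : Int × Int) x => (st.1 + x, st.2 + (st.1 + x))) (a, 0)).2
      = (t.length : Int) * a + pvWsum t := by
  induction t using List.reverseRecOn with
  | nil => simp [pvWsum]
  | append_singleton t x ih =>
      rw [List.foldl_append]
      simp only [List.foldl_cons, List.foldl_nil]
      rw [pvFoldA_fst, ih, pvWsum_append]
      push_cast [List.length_append, List.length_singleton]
      ring

lemma pvFoldB (s : List Int) (d j : Nat) (hd : j + d = s.length) (init : Int) :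
    (PySem.List.pyRange (j : Int) (s.length : Int) 1).foldl
        (fun pen k => pen + ((s.length : Int) - k) * PySem.List.pyGetD s k 0) init
      = init + pvWsum (s.drop j) := by
  induction d generalizing j init with
  | zero =>
      have hj : (s.length : Int) ≤ (j : Int) := by omega
      rw [PySem.List.pyRange_one_eq_nil hj]
      have : s.drop j = [] := by
        apply List.drop_eq_nil_of_le; omega
      simp [this, pvWsum]
  | succ d ih =>
      have hjlt : j < s.length := by omega
      have hlt : (j : Int) < (s.length : Int) := by exact_mod_cast hjlt
      rw [PySem.List.pyRange_one_cons hlt, List.foldl_cons]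
      have hstep : ((j : Int) + 1) = ((j + 1 : Nat) : Int) := by push_cast; ring
      rw [hstep, ih (j + 1) (by omega)]
      have hget : PySem.List.pyGetD s (j : Int) 0 = s[j] := by
        rw [PySem.List.pyGetD_natCast]
        simp [List.getD_eq_getElem?_getD, hjlt]
      have hdrop : s.drop j = s[j] :: s.drop (j + 1) :=
        List.drop_eq_getElem_cons hjlt
      rw [hdrop]
      simp only [pvWsum, List.length_drop]
      rw [hget]
      have : ((s.length - (j + 1) : Nat) : Int) + 1 = (s.length : Int) - (j : Int) := by
        omega
      rw [this]
      ring

-- ===== VERDICT (by name: the statement is the Claim_ definition above) =====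
theorem getTotalTime_spec : Claim_equal_getTotalTime := by
  intro arr _ hpre
  unfold Spec_getTotalTime getTotalTime getTotalTime_alt
  dsimp only
  set s := PySem.List.sorted arr (fun x => x) true with hs
  have hsne : s ≠ [] := by
    intro h
    exact hpre (List.Perm.eq_nil
      ((PySem.List.sorted_perm arr (fun x => x) true).symm.trans (h ▸ List.Perm.refl _)))
  obtain ⟨a, t, hst⟩ := List.exists_cons_of_ne_nil hsne
  have hget0 : PySem.List.pyGetD s 0 0 = a := by rw [hst]; simp
  have hA := PySem.List.foldl_pyRange_pyGetD s 0
      (fun (st : Int × Int) v => (st.1 + v, st.2 + (st.1 + v)))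
      ((PySem.List.pyGetD s 0 0, 0) : Int × Int) (show (0 : Int) ≤ 1 by norm_num)
  beta_reduce at hA
  rw [PySem.List.len_eq] at hA
  have hdrop1 : s.drop (1 : Int).toNat = t := by rw [hst]; rfl
  rw [hdrop1] at hA
  have hB := pvFoldB s (s.length - 1) 1 (by rw [hst]; simp only [List.length_cons]; omega)
      (((s.length : Int) - 1) * PySem.List.pyGetD s 0 0)
  rw [show ((1 : Nat) : Int) = (1 : Int) from rfl] at hB
  have hds : s.drop 1 = t := by rw [hst]; rfl
  rw [hds] at hB
  rw [PySem.List.len_eq, hA, hB, hget0, pvFoldA_snd]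
  have hls : (s.length : Int) = (t.length : Int) + 1 := by
    rw [hst]; push_cast [List.length_cons]; ring
  rw [hls]
  ring
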